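-- pv_equiv track=rewrite | github.com/TiscoDisco/Python-codes | Make Chart.py | highest_leng
-- ===== SOURCE A (Python) =====
-- def highest_leng (data, count, highest):
--     if count == (len(data)):
--         return highest
--     else:
--         if len(data[count]) > highest:
--             highest = len(data[count])
--             return (highest_leng(data, count+2, highest))
--         else:
--             return(highest_leng(data, count+2, highest))
-- ===== SOURCE B (Python) =====
-- def highest_leng(data, count, highest):
--     while count != len(data):
--         highest = max(highest, len(data[count]))
--         count += 2
--     return highest
-- ===== Notes on version B (the rewrite author's own statement) =====
-- stated objective: simpler
-- what changed: Replaces the step-by-2 recursion threading the running maximum through an accumulator parameter with a plain iterative while loop updating highest via max().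
import Mathlib
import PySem

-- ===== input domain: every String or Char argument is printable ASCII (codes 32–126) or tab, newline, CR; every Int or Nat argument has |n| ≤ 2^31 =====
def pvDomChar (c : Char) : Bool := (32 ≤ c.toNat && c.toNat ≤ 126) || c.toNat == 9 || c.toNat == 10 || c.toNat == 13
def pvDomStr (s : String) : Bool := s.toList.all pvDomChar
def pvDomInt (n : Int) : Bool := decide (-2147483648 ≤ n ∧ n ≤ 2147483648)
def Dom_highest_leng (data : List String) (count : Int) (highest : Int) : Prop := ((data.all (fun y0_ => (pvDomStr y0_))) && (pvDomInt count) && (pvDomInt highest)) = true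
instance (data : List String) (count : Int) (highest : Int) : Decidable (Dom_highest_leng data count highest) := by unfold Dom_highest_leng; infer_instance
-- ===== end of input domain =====

-- B replaces A's step-by-2 accumulator recursion with a plain iterative while loop updating highest via max() (objective: simpler).

-- ===== PORT A =====
-- A's recursion made total with fuel; fuel suffices on every input where the Python returns
-- (the `none` index case and fuel exhaustion only occur outside Pre_).
def highest_leng_go (data : List String) (count : Int) (highest : Int) : Nat → Int
  | 0 => highest
  | f + 1 =>
    if count = PySem.List.len data then highest
    else
      match PySem.List.pyGet? data count with
      | none => highest  -- IndexError in Python: excluded by Pre_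
      | some s =>
        if PySem.Str.len s > highest then
          highest_leng_go data (count + 2) (PySem.Str.len s) f
        else
          highest_leng_go data (count + 2) highest f

def highest_leng (data : List String) (count : Int) (highest : Int) : Int :=
  highest_leng_go data count highest ((PySem.List.len data - count).toNat + 1)

-- ===== PORT B =====
-- B's while loop made total with the same fuel bound; fuel exhaustion only occurs outside Pre_
-- (where the Python loop overshoots len(data) and raises IndexError at the stale index).
def highest_leng_alt_go (data : List String) : Nat → Int → Int → Int
  | 0, _, highest => highest
  | f + 1, count, highest =>
    if count = PySem.List.len data then highest
    else
      highest_leng_alt_go data f (count + 2)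
        (max highest (PySem.Str.len ((PySem.List.pyGet? data count).getD "")))

def highest_leng_alt (data : List String) (count : Int) (highest : Int) : Int :=
  highest_leng_alt_go data ((PySem.List.len data - count).toNat + 1) count highest

-- ===== PRECONDITION & SPEC =====
-- Pre_ excludes exactly the inputs on which A raises IndexError: count < -len(data) (invalid index at once),
-- count > len(data), or the wrong parity to hit len(data) exactly (the scan steps past it).
def Pre_highest_leng (data : List String) (count : Int) (highest : Int) : Prop :=
  -(data.length : Int) ≤ count ∧ count ≤ (data.length : Int) ∧ ((data.length : Int) - count) % 2 = 0
instance (data : List String) (count : Int) (highest : Int) : Decidable (Pre_highest_leng data count highest) := by unfold Pre_highest_leng; infer_instance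
def pvWitness_highest_leng : List String × Int × Int := (["ab", "c"], 0, 0)

def Spec_highest_leng (data : List String) (count : Int) (highest : Int) (out : Int) : Prop := out = highest_leng_alt data count highest
instance (data : List String) (count : Int) (highest : Int) (out : Int) : Decidable (Spec_highest_leng data count highest out) := by unfold Spec_highest_leng; infer_instance

-- ===== CLAIM (what is proved, stated in full; the proofs are below) =====
def Claim_equal_highest_leng : Prop := ∀ (data : List String) (count : Int) (highest : Int), Dom_highest_leng data count highest → Pre_highest_leng data count highest → Spec_highest_leng data count highest (highest_leng data count highest)

-- ===== LEMMAS AND PROOFS =====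

lemma pyRange_two_cons (a b : Int) (h : a < b) :
    PySem.List.pyRange a b 2 = a :: PySem.List.pyRange (a + 2) b 2 := by
  rw [PySem.List.pyRange_of_pos a b (by norm_num), PySem.List.pyRange_of_pos (a + 2) b (by norm_num)]
  by_cases h2 : a + 2 < b
  · have hn : ((b - a + 2 - 1) / 2).toNat = ((b - (a + 2) + 2 - 1) / 2).toNat + 1 := by omega
    rw [if_pos h, if_pos h2, hn, List.range_succ_eq_map, List.map_cons, List.map_map]
    refine congrArg₂ _ (by simp) ?_
    apply List.map_congr_left
    intro k _
    simp only [Function.comp_apply]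
    push_cast
    ring
  · have hn : ((b - a + 2 - 1) / 2).toNat = 1 := by omega
    rw [if_pos h, if_neg h2, hn]
    simp

lemma pyRange_two_nil (a b : Int) (h : b ≤ a) :
    PySem.List.pyRange a b 2 = [] := by
  rw [PySem.List.pyRange_of_pos a b (by norm_num), if_neg (by omega)]
  simp

lemma go_eq_fold (data : List String) :
    ∀ (k : Nat), ∀ (count highest : Int) (f : Nat),
      -(data.length : Int) ≤ count → (data.length : Int) - count = 2 * k → k < f →
      highest_leng_go data count highest f =
        ((PySem.List.pyRange count (PySem.List.len data) 2).map
          (fun i => PySem.Str.len ((PySem.List.pyGet? data i).getD ""))).foldl max highest := by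
  intro k
  induction k with
  | zero =>
    intro count highest f hlo hk hf
    have hc : count = (data.length : Int) := by omega
    obtain ⟨f', rfl⟩ : ∃ f', f = f' + 1 := ⟨f - 1, by omega⟩
    rw [highest_leng_go, if_pos (by simpa using hc)]
    rw [show PySem.List.len data = (data.length : Int) from PySem.List.len_eq data,
      pyRange_two_nil _ _ (le_of_eq hc.symm)]
    simp
  | succ k ih =>
    intro count highest f hlo hk hf
    have hcn : count < (data.length : Int) := by omega
    obtain ⟨f', rfl⟩ : ∃ f', f = f' + 1 := ⟨f - 1, by omega⟩
    have hget : PySem.List.pyGet? data count ≠ none := by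
      intro hno
      have hni := (PySem.List.pyGet?_eq_none_iff data count).mp hno
      simp only [PySem.Raise.InRange] at hni
      omega
    obtain ⟨s, hs⟩ := Option.ne_none_iff_exists'.mp hget
    rw [highest_leng_go, if_neg (by simpa using (ne_of_lt hcn)), hs]
    rw [show PySem.List.len data = (data.length : Int) from PySem.List.len_eq data,
      pyRange_two_cons _ _ hcn, List.map_cons, List.foldl_cons, hs]
    simp only [Option.getD_some]
    by_cases hbig : PySem.Str.len s > highest
    · rw [if_pos hbig, max_eq_right (le_of_lt hbig)]
      rw [ih (count + 2) (PySem.Str.len s) f' (by omega) (by omega) (by omega)]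
      rw [PySem.List.len_eq]
    · rw [if_neg hbig, max_eq_left (by omega)]
      rw [ih (count + 2) highest f' (by omega) (by omega) (by omega)]
      rw [PySem.List.len_eq]

lemma alt_go_eq_fold (data : List String) :
    ∀ (k : Nat), ∀ (count highest : Int) (f : Nat),
      -(data.length : Int) ≤ count → (data.length : Int) - count = 2 * k → k < f →
      highest_leng_alt_go data f count highest =
        ((PySem.List.pyRange count (PySem.List.len data) 2).map
          (fun i => PySem.Str.len ((PySem.List.pyGet? data i).getD ""))).foldl max highest := by
  intro k
  induction k with
  | zero =>
    intro count highest f hlo hk hf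
    have hc : count = (data.length : Int) := by omega
    obtain ⟨f', rfl⟩ : ∃ f', f = f' + 1 := ⟨f - 1, by omega⟩
    rw [highest_leng_alt_go, if_pos (by simpa using hc)]
    rw [show PySem.List.len data = (data.length : Int) from PySem.List.len_eq data,
      pyRange_two_nil _ _ (le_of_eq hc.symm)]
    simp
  | succ k ih =>
    intro count highest f hlo hk hf
    have hcn : count < (data.length : Int) := by omega
    obtain ⟨f', rfl⟩ : ∃ f', f = f' + 1 := ⟨f - 1, by omega⟩
    rw [highest_leng_alt_go, if_neg (by simpa using (ne_of_lt hcn))]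
    rw [show PySem.List.len data = (data.length : Int) from PySem.List.len_eq data,
      pyRange_two_cons _ _ hcn, List.map_cons, List.foldl_cons]
    rw [ih (count + 2) _ f' (by omega) (by omega) (by omega)]
    rw [PySem.List.len_eq]

-- ===== VERDICT (by name: the statement is the Claim_ definition above) =====
theorem highest_leng_spec : Claim_equal_highest_leng := by
  intro data count highest _ hpre
  obtain ⟨h1, h2, h3⟩ := hpre
  unfold Spec_highest_leng
  have hk : (data.length : Int) - count = 2 * (((data.length : Int) - count) / 2).toNat := by omega
  have hf : (((data.length : Int) - count) / 2).toNat < (PySem.List.len data - count).toNat + 1 := by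
    rw [PySem.List.len_eq]; omega
  rw [highest_leng, highest_leng_alt,
    go_eq_fold data (((data.length : Int) - count) / 2).toNat count highest _ h1 hk hf,
    alt_go_eq_fold data (((data.length : Int) - count) / 2).toNat count highest _ h1 hk hf]
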